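-- pv_equiv track=rewrite | github.com/lynxf/python_course | Homework/Homework3/task1.py | longest_album
-- ===== SOURCE A (Python) =====
-- def longest_album(durations_list, artists_list, albums_list):
--     album_artist_durations = {}
--     counter = 0
--     for album in albums_list:
--         if str(album+"\t"+artists_list[counter]) in album_artist_durations:
--             album_artist_durations[str(album+"\t"+artists_list[counter])] += int(durations_list[counter])
--         else:
--             album_artist_durations[str(album+"\t"+artists_list[counter])] = int(durations_list[counter])
--         counter += 1
--     return sorted(album_artist_durations, key=album_artist_durations.get, reverse = True)[0]
-- ===== SOURCE B (Python) =====
-- def longest_album(durations_list, artists_list, albums_list):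
--     # distinct keys in first-appearance order
--     keys = []
--     for i, album in enumerate(albums_list):
--         k = album + "\t" + artists_list[i]
--         if k not in keys:
--             keys.append(k)
--
--     def total(k):
--         t = 0
--         for j, album in enumerate(albums_list):
--             if album + "\t" + artists_list[j] == k:
--                 t += int(durations_list[j])
--         return t
--
--     best_i = 0
--     for i in range(len(keys)):
--         if total(keys[i]) > total(keys[best_i]):
--             best_i = i
--     return keys[best_i]
-- ===== Notes on version B (the rewrite author's own statement) =====
-- stated objective: alternative
-- what changed: Instead of accumulating per-key totals in one dict pass and sorting the keys by value, B collects the distinct album+tab+artist keys in first-appearance order and picks the winner by a strict-greater argmax scan that recomputes each key's total by rescanning the input, so no dict and no sort are used.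
import Mathlib
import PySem

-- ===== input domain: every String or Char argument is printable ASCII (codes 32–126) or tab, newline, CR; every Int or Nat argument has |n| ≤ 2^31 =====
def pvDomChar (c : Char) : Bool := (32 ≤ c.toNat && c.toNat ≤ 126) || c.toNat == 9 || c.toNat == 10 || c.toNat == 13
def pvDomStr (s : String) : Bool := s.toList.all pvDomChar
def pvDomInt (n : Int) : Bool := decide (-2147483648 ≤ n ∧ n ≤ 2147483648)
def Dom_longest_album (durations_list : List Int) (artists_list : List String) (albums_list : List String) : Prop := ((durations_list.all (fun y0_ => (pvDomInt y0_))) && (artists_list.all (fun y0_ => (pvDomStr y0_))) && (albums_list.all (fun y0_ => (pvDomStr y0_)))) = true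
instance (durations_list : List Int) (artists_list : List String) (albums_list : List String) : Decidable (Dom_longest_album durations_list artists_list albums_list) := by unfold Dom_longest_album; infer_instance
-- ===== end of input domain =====

-- B replaces A's dict-accumulation + value-sort by a distinct-key list and a strict-greater
-- argmax scan that re-sums the input per key (objective: alternative; not faster).

-- ===== PORT A =====
-- the dict loop carries (dict, counter); int(durations_list[counter]) is the Int itself;
-- str(...) of a str is the identity and is dropped.
def longest_album (durations_list : List Int) (artists_list : List String) (albums_list : List String) : String :=
  let st := albums_list.foldl
    (fun (st : PySem.Dict String Int × Int) album =>
      ((if st.1.contains (album ++ "\t" ++ PySem.List.pyGetD artists_list st.2 "") then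
          st.1.insert (album ++ "\t" ++ PySem.List.pyGetD artists_list st.2 "")
            (st.1.getD (album ++ "\t" ++ PySem.List.pyGetD artists_list st.2 "") 0 +
              PySem.List.pyGetD durations_list st.2 0)
        else
          st.1.insert (album ++ "\t" ++ PySem.List.pyGetD artists_list st.2 "")
            (PySem.List.pyGetD durations_list st.2 0)), st.2 + 1))
    (PySem.Dict.empty, (0 : Int))
  -- key=album_artist_durations.get: every element being sorted is a key of the dict,
  -- so Python's get returns its value — exactly getD _ 0 here
  PySem.List.pyGetD (PySem.List.sorted st.1.keys (fun k => st.1.getD k 0) true) 0 ""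

-- ===== PORT B =====
-- helper: B's inner 'total(k)' loop
def lb_total (durations_list : List Int) (artists_list : List String) (albums_list : List String) (k : String) : Int :=
  (PySem.List.enumerate albums_list 0).foldl
    (fun t p =>
      if p.2 ++ "\t" ++ PySem.List.pyGetD artists_list p.1 "" = k then
        t + PySem.List.pyGetD durations_list p.1 0
      else t) 0

def longest_album_alt (durations_list : List Int) (artists_list : List String) (albums_list : List String) : String :=
  let keys : List String := (PySem.List.enumerate albums_list 0).foldl
    (fun ks p =>
      if ks.contains (p.2 ++ "\t" ++ PySem.List.pyGetD artists_list p.1 "") then ks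
      else ks ++ [p.2 ++ "\t" ++ PySem.List.pyGetD artists_list p.1 ""]) []
  let best := (PySem.List.pyRange 0 (PySem.List.len keys) 1).foldl
    (fun (best : Int) i =>
      if lb_total durations_list artists_list albums_list (PySem.List.pyGetD keys i "") >
         lb_total durations_list artists_list albums_list (PySem.List.pyGetD keys best "")
      then i else best) 0
  PySem.List.pyGetD keys best ""

-- ===== PRECONDITION & SPEC =====
-- Pre_ excludes exactly the inputs where A raises IndexError: an empty albums_list
-- (indexing the sorted key list at 0), or artists/durations lists shorter than albums_list.
def Pre_longest_album (durations_list : List Int) (artists_list : List String) (albums_list : List String) : Prop :=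
  albums_list ≠ [] ∧ albums_list.length ≤ artists_list.length ∧ albums_list.length ≤ durations_list.length
instance (durations_list : List Int) (artists_list : List String) (albums_list : List String) : Decidable (Pre_longest_album durations_list artists_list albums_list) := by unfold Pre_longest_album; infer_instance

def pvWitness_longest_album : List Int × List String × List String := ([3, 1], ["x", "y"], ["p", "q"])

def Spec_longest_album (durations_list : List Int) (artists_list : List String) (albums_list : List String) (out : String) : Prop := out = longest_album_alt durations_list artists_list albums_list
instance (durations_list : List Int) (artists_list : List String) (albums_list : List String) (out : String) : Decidable (Spec_longest_album durations_list artists_list albums_list out) := by unfold Spec_longest_album; infer_instance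

-- ===== CLAIM (what is proved, stated in full; the proofs are below) =====
def Claim_equal_longest_album : Prop := ∀ (durations_list : List Int) (artists_list : List String) (albums_list : List String), Dom_longest_album durations_list artists_list albums_list → Pre_longest_album durations_list artists_list albums_list → Spec_longest_album durations_list artists_list albums_list (longest_album durations_list artists_list albums_list)

-- ===== LEMMAS AND PROOFS =====

-- the per-row (key, duration) pairs both programs work through
def lb_pairs (durations_list : List Int) (artists_list : List String) (albums_list : List String) : List (String × Int) :=
  ((albums_list.zip artists_list).map (fun q => q.1 ++ "\t" ++ q.2)).zip durations_list

-- total duration of key k over a pair list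
def lb_tot (l : List (String × Int)) (k : String) : Int :=
  (l.map (fun p => if p.1 = k then p.2 else 0)).sum

-- b is the first index of maximal g among 0..n-1
def lb_FirstMaxIdx (g : Nat → Int) (n b : Nat) : Prop :=
  b < n ∧ (∀ j, j < n → g j ≤ g b) ∧ (∀ j, j < b → g j < g b)

-- an index loop over albums_list looking up artists/durations at the counter is
-- a plain fold over the zipped (key, duration) pairs
theorem lb_foldl_enum {σ : Type} (a : List String) (d : List Int) (al : List String)
    (c : Nat) (ha : c + al.length ≤ a.length) (hd : c + al.length ≤ d.length)
    (step : σ → String × Int → σ) (init : σ) :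
    (PySem.List.enumerate al (c : Int)).foldl
      (fun s p => step s (p.2 ++ "\t" ++ PySem.List.pyGetD a p.1 "", PySem.List.pyGetD d p.1 0)) init
    = (((al.zip (a.drop c)).map (fun q => q.1 ++ "\t" ++ q.2)).zip (d.drop c)).foldl step init := by
  induction al generalizing c init with
  | nil => rfl
  | cons x xs ih =>
    have hc : c < a.length := by simp at ha; omega
    have hcd : c < d.length := by simp at hd; omega
    rw [PySem.List.enumerate_cons, List.foldl_cons,
        List.drop_eq_getElem_cons hc, List.drop_eq_getElem_cons hcd]
    simp only [List.zip_cons_cons, List.map_cons, List.foldl_cons]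
    rw [show (c : Int) + 1 = ((c + 1 : Nat) : Int) by push_cast; ring]
    rw [ih (c + 1) (by simp at ha ⊢; omega) (by simp at hd ⊢; omega)]
    simp [List.getD_eq_getElem?_getD, List.getElem?_eq_getElem hc, List.getElem?_eq_getElem hcd]

-- A's manual counter fold is the enumerate fold
theorem lb_foldl_counter {σ α : Type} (al : List α) (c : Int) (f : σ → Int → α → σ) (init : σ) :
    (al.foldl (fun (st : σ × Int) x => (f st.1 st.2 x, st.2 + 1)) (init, c)).1
    = (PySem.List.enumerate al c).foldl (fun s p => f s p.1 p.2) init := by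
  induction al generalizing c init with
  | nil => rfl
  | cons x xs ih => simpa [PySem.List.enumerate_cons] using ih (c + 1) (f init c x)

-- getD of the accumulation fold is the pairwise total
theorem lb_getD_foldl (l : List (String × Int)) (d : PySem.Dict String Int) (k : String) :
    (l.foldl (fun d p => d.insert p.1 (d.getD p.1 0 + p.2)) d).getD k 0
    = d.getD k 0 + lb_tot l k := by
  induction l generalizing d with
  | nil => simp [lb_tot]
  | cons p t ih =>
    simp only [List.foldl_cons, ih, PySem.Dict.getD_insert, lb_tot, List.map_cons, List.sum_cons]
    by_cases h : p.1 = k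
    · subst h; simp; ring
    · rw [if_neg h, if_neg (fun hk => h hk.symm)]
      simp

-- an if-accumulating fold is the pairwise total
theorem lb_foldl_tot (l : List (String × Int)) (k : String) (t : Int) :
    l.foldl (fun t p => if p.1 = k then t + p.2 else t) t = t + lb_tot l k := by
  induction l generalizing t with
  | nil => simp [lb_tot]
  | cons p s ih =>
    simp only [List.foldl_cons, ih, lb_tot, List.map_cons, List.sum_cons]
    by_cases h : p.1 = k
    · simp [h]
      ring
    · simp [h]

-- head of a stable reverse sort is the first element attaining the maximal key
theorem lb_sorted_rev_head {α : Type} (f : α → Int) (xs : List α) (m : α) (t : List α)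
    (h : PySem.List.sorted xs f true = m :: t) :
    ∃ p, ∃ hp : p < xs.length, xs[p] = m ∧ (∀ y ∈ xs, f y ≤ f m) ∧
      (∀ j, (hj : j < p) → f (xs[j]) < f m) := by
  induction xs using List.reverseRecOn generalizing m t with
  | nil =>
    rw [(PySem.List.sorted_eq_nil_iff ([] : List α) f true).mpr rfl] at h
    cases h
  | append_singleton xs x ih =>
    have hins : PySem.List.sorted (xs ++ [x]) f true
        = PySem.List.insertBy (fun a b => decide (f b < f a)) x (PySem.List.sorted xs f true) := by
      rw [PySem.List.sorted_rev_eq_foldl_insertBy, PySem.List.sorted_rev_eq_foldl_insertBy,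
          List.foldl_append, List.foldl_cons, List.foldl_nil]
    rw [hins] at h
    cases hS : PySem.List.sorted xs f true with
    | nil =>
      rw [hS] at h
      have hxs : xs = [] := (PySem.List.sorted_eq_nil_iff xs f true).mp hS
      subst hxs
      simp [PySem.List.insertBy] at h
      refine ⟨0, by simp, ?_, ?_, ?_⟩
      · simpa using h.1
      · intro y hy
        simp at hy
        subst hy
        exact le_of_eq (congrArg f h.1)
      · intro j hj; omega
    | cons h0 t0 =>
      rw [hS] at h
      obtain ⟨p0, hp0, hxp0, hle0, hlt0⟩ := ih h0 t0 hS
      by_cases hcmp : f h0 < f x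
      · rw [show PySem.List.insertBy (fun a b => decide (f b < f a)) x (h0 :: t0) = x :: h0 :: t0 by
              simp [PySem.List.insertBy, hcmp]] at h
        have hmx : x = m := (List.cons_eq_cons.mp h).1
        refine ⟨xs.length, by simp only [List.length_append, List.length_cons, List.length_nil]; omega, ?_, ?_, ?_⟩
        · simpa using hmx
        · intro y hy
          rw [← hmx]
          rcases List.mem_append.mp hy with hy | hy
          · exact le_of_lt (lt_of_le_of_lt (hle0 y hy) hcmp)
          · simp at hy; subst hy; exact le_refl _
        · intro j hj
          rw [List.getElem_append_left hj, ← hmx]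
          exact lt_of_le_of_lt (hle0 _ (List.getElem_mem _)) hcmp
      · rw [show PySem.List.insertBy (fun a b => decide (f b < f a)) x (h0 :: t0)
              = h0 :: PySem.List.insertBy (fun a b => decide (f b < f a)) x t0 by
              simp [PySem.List.insertBy, hcmp]] at h
        have hm : m = h0 := (List.cons_eq_cons.mp h).1.symm
        subst hm
        refine ⟨p0, by simp; omega, ?_, ?_, ?_⟩
        · rw [List.getElem_append_left hp0]; exact hxp0
        · intro y hy
          rcases List.mem_append.mp hy with hy | hy
          · exact hle0 y hy
          · simp at hy; subst hy; exact not_lt.mp hcmp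
        · intro j hj
          rw [List.getElem_append_left (by omega)]
          exact hlt0 j hj

-- the first-max index is unique
theorem lb_FirstMaxIdx_unique (g : Nat → Int) (n b b' : Nat)
    (h : lb_FirstMaxIdx g n b) (h' : lb_FirstMaxIdx g n b') : b = b' := by
  obtain ⟨hb, hle, hlt⟩ := h
  obtain ⟨hb', hle', hlt'⟩ := h'
  rcases lt_trichotomy b b' with hc | hc | hc
  · exact absurd (hle b' hb') (not_le.mpr (hlt' b hc))
  · exact hc
  · exact absurd (hle' b hb) (not_le.mpr (hlt b' hc))

-- B's argmax loop computes the first-max index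
theorem lb_argmax_loop (ks : List String) (g : String → Int) (n : Nat) (hn : 0 < n) :
    ∃ b : Nat,
      (List.range n).foldl
        (fun (best : Int) (i : Nat) =>
          if g (PySem.List.pyGetD ks best "") < g (PySem.List.pyGetD ks ((i : Int)) "") then ((i : Nat) : Int) else best) 0
      = (b : Int) ∧ lb_FirstMaxIdx (fun j => g (ks.getD j "")) n b := by
  induction n with
  | zero => omega
  | succ n ih =>
    rcases Nat.eq_zero_or_pos n with hn0 | hn0
    · subst hn0
      refine ⟨0, ?_, ?_⟩
      · simp [List.range_succ]
      · exact ⟨Nat.one_pos, fun j hj => by interval_cases j; exact le_refl _, fun j hj => by omega⟩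
    · obtain ⟨b, hfold, hb, hle, hlt⟩ := ih hn0
      rw [List.range_succ, List.foldl_append, hfold, List.foldl_cons, List.foldl_nil]
      simp only [PySem.List.pyGetD_natCast]
      by_cases hc : g (ks.getD b "") < g (ks.getD n "")
      · refine ⟨n, by rw [if_pos hc], Nat.lt_succ_self n, ?_, ?_⟩
        · intro j hj
          rcases Nat.lt_succ_iff_lt_or_eq.mp hj with hj | hj
          · exact le_of_lt (lt_of_le_of_lt (hle j hj) hc)
          · subst hj; exact le_refl _
        · intro j hj
          exact lt_of_le_of_lt (hle j hj) hc
      · refine ⟨b, by rw [if_neg hc], Nat.lt_succ_of_lt hb, ?_, hlt⟩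
        intro j hj
        rcases Nat.lt_succ_iff_lt_or_eq.mp hj with hj | hj
        · exact hle j hj
        · subst hj; exact not_lt.mp hc

-- foldl over pairs using only first components / over a cast range (List.foldl_map instances)
theorem lb_foldl_fst {σ : Type} (l : List (String × Int)) (f : σ → String → σ) (init : σ) :
    l.foldl (fun s q => f s q.1) init = (l.map Prod.fst).foldl f init := List.foldl_map.symm

theorem lb_foldl_cast (n : Nat) (f : Int → Int → Int) (init : Int) :
    ((List.range n).map (fun k => ((k : Nat) : Int))).foldl f init
    = (List.range n).foldl (fun s k => f s ((k : Nat) : Int)) init := List.foldl_map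

-- ===== VERDICT (by name: the statement is the Claim_ definition above) =====
set_option maxHeartbeats 2000000 in
theorem longest_album_spec : Claim_equal_longest_album := by
  intro dl a al hdom hpre
  obtain ⟨hne, ha, hd⟩ := hpre
  have h1 : 0 + al.length ≤ a.length := by omega
  have h2 : 0 + al.length ≤ dl.length := by omega
  have hkylen : ((al.zip a).map (fun q => q.1 ++ "\t" ++ q.2)).length = al.length := by simp; omega
  have hkyle : ((al.zip a).map (fun q => q.1 ++ "\t" ++ q.2)).length ≤ dl.length := by omega
  -- A's dict fold is the plain accumulation over the (key, duration) pairs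
  have hA1 : (al.foldl (fun (st : PySem.Dict String Int × Int) album => ((if st.1.contains (album ++ "\t" ++ PySem.List.pyGetD a st.2 "") then st.1.insert (album ++ "\t" ++ PySem.List.pyGetD a st.2 "") (st.1.getD (album ++ "\t" ++ PySem.List.pyGetD a st.2 "") 0 + PySem.List.pyGetD dl st.2 0) else st.1.insert (album ++ "\t" ++ PySem.List.pyGetD a st.2 "") (PySem.List.pyGetD dl st.2 0)), st.2 + 1)) (PySem.Dict.empty, (0 : Int))).1 = (((al.zip a).map (fun q => q.1 ++ "\t" ++ q.2)).zip dl).foldl (fun (dd : PySem.Dict String Int) (q : String × Int) => dd.insert q.1 (dd.getD q.1 0 + q.2)) (PySem.Dict.empty : PySem.Dict String Int) := by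
    have e1 := lb_foldl_counter (σ := PySem.Dict String Int) al 0 (fun s i x => if s.contains (x ++ "\t" ++ PySem.List.pyGetD a i "") then s.insert (x ++ "\t" ++ PySem.List.pyGetD a i "") (s.getD (x ++ "\t" ++ PySem.List.pyGetD a i "") 0 + PySem.List.pyGetD dl i 0) else s.insert (x ++ "\t" ++ PySem.List.pyGetD a i "") (PySem.List.pyGetD dl i 0)) (PySem.Dict.empty : PySem.Dict String Int)
    have e2 := lb_foldl_enum (σ := PySem.Dict String Int) a dl al 0 h1 h2 (fun dd q => if dd.contains q.1 then dd.insert q.1 (dd.getD q.1 0 + q.2) else dd.insert q.1 q.2) (PySem.Dict.empty : PySem.Dict String Int)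
    simp only [Nat.cast_zero, List.drop_zero] at e2
    have hstepeq : (fun (dd : PySem.Dict String Int) (q : String × Int) => if dd.contains q.1 then dd.insert q.1 (dd.getD q.1 0 + q.2) else dd.insert q.1 q.2) = fun dd q => dd.insert q.1 (dd.getD q.1 0 + q.2) := by
      funext dd q
      cases hc : dd.contains q.1
      · rw [if_neg (by simp [hc]), PySem.Dict.getD_of_not_contains dd 0 hc, zero_add]
      · rw [if_pos (by simp [hc])]
    rw [hstepeq] at e2
    exact e1.trans e2
  -- the dict's keys are the distinct keys in first-appearance order
  have hkeys : ((((al.zip a).map (fun q => q.1 ++ "\t" ++ q.2)).zip dl).foldl (fun (dd : PySem.Dict String Int) (q : String × Int) => dd.insert q.1 (dd.getD q.1 0 + q.2)) (PySem.Dict.empty : PySem.Dict String Int)).keys = (PySem.Set.ofList ((al.zip a).map (fun q => q.1 ++ "\t" ++ q.2))) := by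
    have e := PySem.Dict.keys_foldl_insert_key (((al.zip a).map (fun q => q.1 ++ "\t" ++ q.2)).zip dl) Prod.fst (fun (dd : PySem.Dict String Int) (q : String × Int) => dd.getD q.1 0 + q.2) (PySem.Dict.empty : PySem.Dict String Int)
    refine e.trans ?_
    rw [List.map_fst_zip hkyle, PySem.Dict.keys_empty, PySem.Set.ofList_eq_foldl]
    rfl
  -- the dict's stored values are the pairwise totals
  have hF : (fun k => ((((al.zip a).map (fun q => q.1 ++ "\t" ++ q.2)).zip dl).foldl (fun (dd : PySem.Dict String Int) (q : String × Int) => dd.insert q.1 (dd.getD q.1 0 + q.2)) (PySem.Dict.empty : PySem.Dict String Int)).getD k 0) = fun k => lb_tot (((al.zip a).map (fun q => q.1 ++ "\t" ++ q.2)).zip dl) k := by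
    funext k
    rw [lb_getD_foldl, PySem.Dict.getD_empty, zero_add]
  -- B's key-collection loop builds the same distinct-key list
  have hBkeys : ((PySem.List.enumerate al 0).foldl (fun ks p => if ks.contains (p.2 ++ "\t" ++ PySem.List.pyGetD a p.1 "") then ks else ks ++ [p.2 ++ "\t" ++ PySem.List.pyGetD a p.1 ""]) []) = (PySem.Set.ofList ((al.zip a).map (fun q => q.1 ++ "\t" ++ q.2))) := by
    have e := lb_foldl_enum (σ := List String) a dl al 0 h1 h2 (fun ks (q : String × Int) => if ks.contains q.1 then ks else ks ++ [q.1]) []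
    simp only [Nat.cast_zero, List.drop_zero] at e
    have e3 := lb_foldl_fst (((al.zip a).map (fun q => q.1 ++ "\t" ++ q.2)).zip dl) (fun (s : List String) x => if s.contains x then s else s ++ [x]) ([] : List String)
    refine e.trans (e3.trans ?_)
    rw [List.map_fst_zip hkyle]
    exact (PySem.Set.ofList_eq_foldl _).symm
  -- B's total is the pairwise total
  have hT : lb_total dl a al = fun k => lb_tot (((al.zip a).map (fun q => q.1 ++ "\t" ++ q.2)).zip dl) k := by
    funext k
    have e := lb_foldl_enum (σ := Int) a dl al 0 h1 h2 (fun t (q : String × Int) => if q.1 = k then t + q.2 else t) 0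
    simp only [Nat.cast_zero, List.drop_zero] at e
    exact (e.trans (lb_foldl_tot (((al.zip a).map (fun q => q.1 ++ "\t" ++ q.2)).zip dl) k 0)).trans (zero_add _)
  -- the key list is nonempty
  obtain ⟨k0, hk0⟩ := List.exists_mem_of_ne_nil ((al.zip a).map (fun q => q.1 ++ "\t" ++ q.2)) (List.ne_nil_of_length_pos (by rw [hkylen]; exact List.length_pos_of_ne_nil hne))
  have hk0KS : k0 ∈ (PySem.Set.ofList ((al.zip a).map (fun q => q.1 ++ "\t" ++ q.2))) := (PySem.Set.mem_ofList _ _).mpr hk0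
  -- reduce the goal to the generalized key list and totals
  show PySem.List.pyGetD (PySem.List.sorted (al.foldl (fun (st : PySem.Dict String Int × Int) album => ((if st.1.contains (album ++ "\t" ++ PySem.List.pyGetD a st.2 "") then st.1.insert (album ++ "\t" ++ PySem.List.pyGetD a st.2 "") (st.1.getD (album ++ "\t" ++ PySem.List.pyGetD a st.2 "") 0 + PySem.List.pyGetD dl st.2 0) else st.1.insert (album ++ "\t" ++ PySem.List.pyGetD a st.2 "") (PySem.List.pyGetD dl st.2 0)), st.2 + 1)) (PySem.Dict.empty, (0 : Int))).1.keys (fun k => (al.foldl (fun (st : PySem.Dict String Int × Int) album => ((if st.1.contains (album ++ "\t" ++ PySem.List.pyGetD a st.2 "") then st.1.insert (album ++ "\t" ++ PySem.List.pyGetD a st.2 "") (st.1.getD (album ++ "\t" ++ PySem.List.pyGetD a st.2 "") 0 + PySem.List.pyGetD dl st.2 0) else st.1.insert (album ++ "\t" ++ PySem.List.pyGetD a st.2 "") (PySem.List.pyGetD dl st.2 0)), st.2 + 1)) (PySem.Dict.empty, (0 : Int))).1.getD k 0) true) 0 ""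
      = PySem.List.pyGetD ((PySem.List.enumerate al 0).foldl (fun ks p => if ks.contains (p.2 ++ "\t" ++ PySem.List.pyGetD a p.1 "") then ks else ks ++ [p.2 ++ "\t" ++ PySem.List.pyGetD a p.1 ""]) []) ((PySem.List.pyRange 0 (PySem.List.len ((PySem.List.enumerate al 0).foldl (fun ks p => if ks.contains (p.2 ++ "\t" ++ PySem.List.pyGetD a p.1 "") then ks else ks ++ [p.2 ++ "\t" ++ PySem.List.pyGetD a p.1 ""]) [])) 1).foldl (fun (best : Int) i => if lb_total dl a al (PySem.List.pyGetD ((PySem.List.enumerate al 0).foldl (fun ks p => if ks.contains (p.2 ++ "\t" ++ PySem.List.pyGetD a p.1 "") then ks else ks ++ [p.2 ++ "\t" ++ PySem.List.pyGetD a p.1 ""]) []) i "") > lb_total dl a al (PySem.List.pyGetD ((PySem.List.enumerate al 0).foldl (fun ks p => if ks.contains (p.2 ++ "\t" ++ PySem.List.pyGetD a p.1 "") then ks else ks ++ [p.2 ++ "\t" ++ PySem.List.pyGetD a p.1 ""]) []) best "") then i else best) 0) ""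
  rw [hA1, hkeys, hF, hBkeys]
  simp only [hT, gt_iff_lt]
  generalize hP : lb_tot (((al.zip a).map (fun q => q.1 ++ "\t" ++ q.2)).zip dl) = F
  generalize hK : (PySem.Set.ofList ((al.zip a).map (fun q => q.1 ++ "\t" ++ q.2))) = KS at hk0KS ⊢
  have hKSne : KS ≠ [] := List.ne_nil_of_mem hk0KS
  have hKSpos : 0 < KS.length := List.length_pos_of_mem hk0KS
  -- A's side: the head of the stable reverse value-sort is the first key of maximal total
  obtain ⟨m, t, hmt⟩ := List.exists_cons_of_ne_nil (show PySem.List.sorted KS (fun k => F k) true ≠ [] from fun h0 => hKSne ((PySem.List.sorted_eq_nil_iff _ _ _).mp h0))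
  obtain ⟨p, hp, hxp, hle, hlt⟩ := lb_sorted_rev_head (fun k => F k) KS m t hmt
  rw [hmt, PySem.List.pyGetD_zero_cons]
  -- B's side: the argmax loop returns the first index of maximal total
  have hrange : PySem.List.pyRange 0 (PySem.List.len KS) 1 = (List.range KS.length).map (fun k => ((k : Nat) : Int)) := by
    rw [PySem.List.pyRange_one]
    simp
  rw [hrange, lb_foldl_cast]
  obtain ⟨b, hfold, hfmi⟩ := lb_argmax_loop KS (fun k => F k) KS.length hKSpos
  rw [hfold, PySem.List.pyGetD_natCast]
  -- both selections are the unique first index of maximal total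
  have hfmA : lb_FirstMaxIdx (fun j => F (KS.getD j "")) KS.length p := by
    refine ⟨hp, ?_, ?_⟩
    · intro j hj
      show F (KS.getD j "") ≤ F (KS.getD p "")
      rw [List.getD_eq_getElem _ _ hj, List.getD_eq_getElem _ _ hp, hxp]
      exact hle _ (List.getElem_mem _)
    · intro j hj
      show F (KS.getD j "") < F (KS.getD p "")
      rw [List.getD_eq_getElem _ _ (lt_trans hj hp), List.getD_eq_getElem _ _ hp, hxp]
      exact hlt j hj
  have hpb : p = b := lb_FirstMaxIdx_unique _ _ _ _ hfmA hfmi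
  subst hpb
  rw [List.getD_eq_getElem _ _ hp]
  exact hxp.symm
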